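-- pv_equiv track=rewrite | github.com/luv1327/Scaler_Dsa | IntermediateDsa2/sorting.py | nobleInteger
-- ===== SOURCE A (Python) =====
-- def nobleInteger(A):
--     n = len(A)
--     noble_count = 0
--     for i in range(n):
--         local_count = 0
--         for j in range(n):
--             if A[i] > A[j]:
--                 local_count +=1
--         if local_count == A[i]:
--             noble_count +=1
--     return noble_count
-- ===== SOURCE B (Python) =====
-- def nobleInteger(A):
--     S = sorted(A)
--     count = 0
--     first = 0
--     prev = None
--     for i, x in enumerate(S):
--         if prev is not None and x != prev:
--             first = i
--         if x == first:
--             count += 1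
--         prev = x
--     return count
-- ===== Notes on version B (the rewrite author's own statement) =====
-- stated objective: faster
-- what changed: Instead of an O(n^2) nested scan counting strictly smaller elements for each index, B sorts the list once and walks it linearly, using the start index of each run of equal values as the count of strictly smaller elements.
import Mathlib
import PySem

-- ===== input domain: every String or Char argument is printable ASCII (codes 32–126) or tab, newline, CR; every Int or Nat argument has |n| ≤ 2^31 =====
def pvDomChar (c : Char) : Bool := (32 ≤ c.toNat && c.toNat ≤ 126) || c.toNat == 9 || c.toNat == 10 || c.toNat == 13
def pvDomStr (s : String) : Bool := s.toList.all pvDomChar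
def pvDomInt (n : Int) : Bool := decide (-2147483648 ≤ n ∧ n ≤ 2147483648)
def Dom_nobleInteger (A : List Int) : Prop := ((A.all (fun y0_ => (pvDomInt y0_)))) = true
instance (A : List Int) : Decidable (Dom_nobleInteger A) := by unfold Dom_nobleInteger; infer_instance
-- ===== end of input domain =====

-- B sorts once and uses the start index of each run of equal values as the count of strictly
-- smaller elements instead of A's nested quadratic scan; same return value (objective: faster).


-- ===== PORT A =====
def nobleInteger (A : List Int) : Int :=
  let n : Int := PySem.List.len A
  (PySem.List.pyRange 0 n 1).foldl (fun noble i =>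
    let lc := (PySem.List.pyRange 0 n 1).foldl (fun c j =>
      if PySem.List.pyGetD A i 0 > PySem.List.pyGetD A j 0 then c + 1 else c) (0 : Int)
    if lc = PySem.List.pyGetD A i 0 then noble + 1 else noble) 0

-- ===== PORT B =====
-- the enumerate loop of Source B: remaining elements, current index i, first, prev, count
def pvNobleGo : List Int → Int → Int → Option Int → Int → Int
  | [], _, _, _, count => count
  | x :: rest, i, first, prev, count =>
    let first' := match prev with
      | some p => if x ≠ p then i else first
      | none => first
    pvNobleGo rest (i + 1) first' (some x) (if x = first' then count + 1 else count)

def nobleInteger_alt (A : List Int) : Int :=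
  pvNobleGo (PySem.List.sorted A (fun x => x) false) 0 0 none 0

-- ===== PRECONDITION & SPEC =====
def Spec_nobleInteger (A : List Int) (out : Int) : Prop := out = nobleInteger_alt A
instance (A : List Int) (out : Int) : Decidable (Spec_nobleInteger A out) := by unfold Spec_nobleInteger; infer_instance

-- ===== CLAIM (what is proved, stated in full; the proofs are below) =====
def Claim_equal_nobleInteger : Prop := ∀ (A : List Int), Dom_nobleInteger A → Spec_nobleInteger A (nobleInteger A)

-- ===== LEMMAS AND PROOFS =====

-- the canonical value both programs compute: how many elements equal their strictly-smaller count
def pvNoble (A : List Int) : Int :=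
  (A.countP (fun x => decide ((A.countP (fun y => decide (y < x)) : Int) = x)) : Int)

lemma nobleInteger_eq_canonical (A : List Int) : nobleInteger A = pvNoble A := by
  unfold nobleInteger
  rw [PySem.List.foldl_pyRange_zero_pyGetD A 0
      (f := fun noble a =>
        if ((PySem.List.pyRange 0 (PySem.List.len A) 1).foldl (fun c j =>
              if a > PySem.List.pyGetD A j 0 then c + 1 else c) (0 : Int)) = a
        then noble + 1 else noble) 0]
  have hF : (fun (noble a : Int) =>
        if ((PySem.List.pyRange 0 (PySem.List.len A) 1).foldl (fun c j =>
              if a > PySem.List.pyGetD A j 0 then c + 1 else c) (0 : Int)) = a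
        then noble + 1 else noble)
      = fun noble a => if ((A.countP (fun y => decide (y < a)) : Int) = a) then noble + 1 else noble := by
    funext noble a
    rw [PySem.List.foldl_pyRange_zero_pyGetD A 0 (f := fun c y => if a > y then c + 1 else c) 0,
        PySem.List.foldl_ite_add_one (p := fun y => a > y)]
    simp [gt_iff_lt]
  rw [hF, PySem.List.foldl_ite_add_one (p := fun a => ((A.countP (fun y => decide (y < a)) : Int) = a))]
  simp [pvNoble]

-- in a sorted list, the last element bounds every element
lemma last_max (P : List Int) (p : Int) (h : P.Pairwise (· ≤ ·)) (hp : P.getLast? = some p) :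
    ∀ y ∈ P, y ≤ p := by
  intro y hy
  rcases List.getLast?_eq_some_iff.mp hp with ⟨Q, rfl⟩
  rcases List.mem_append.mp hy with hyQ | hy1
  · exact (List.pairwise_append.mp h).2.2 y hyQ p (by simp)
  · simp_all

-- loop invariant of Source B's single pass over the sorted list S = P ++ R: the index is |P|,
-- prev is P's last element, and first is the count of elements of S strictly below prev
lemma go_spec (S : List Int) (hS : S.Pairwise (· ≤ ·)) :
    ∀ (R P : List Int) (first cnt : Int) (prev : Option Int),
    S = P ++ R →
    prev = P.getLast? →
    (prev = none → first = 0) →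
    (∀ p, prev = some p → first = (S.countP (fun y => decide (y < p)) : Int)) →
    pvNobleGo R (P.length : Int) first prev cnt
      = cnt + (R.countP (fun x => decide ((S.countP (fun y => decide (y < x)) : Int) = x)) : Int) := by
  intro R
  induction R with
  | nil => intro P first cnt prev _ _ _ _; simp [pvNobleGo]
  | cons x rest ih =>
    intro P first cnt prev hSeq hprev h0 hsome
    have hPpw : P.Pairwise (· ≤ ·) := (List.pairwise_append.mp (hSeq ▸ hS)).1
    have hcross : ∀ y ∈ P, ∀ z ∈ x :: rest, y ≤ z := (List.pairwise_append.mp (hSeq ▸ hS)).2.2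
    have hrest : ∀ z ∈ rest, x ≤ z :=
      (List.pairwise_cons.mp (List.pairwise_append.mp (hSeq ▸ hS)).2.1).1
    have tail : ∀ f' : Int, f' = (S.countP (fun y => decide (y < x)) : Int) →
        pvNobleGo rest ((P.length : Int) + 1) f' (some x) (if x = f' then cnt + 1 else cnt)
          = cnt + ((x :: rest).countP
              (fun z => decide ((S.countP (fun y => decide (y < z)) : Int) = z)) : Int) := by
      intro f' hf'
      have hlen : ((P ++ [x]).length : Int) = (P.length : Int) + 1 := by simp
      have hstep := ih (P ++ [x]) f' (if x = f' then cnt + 1 else cnt) (some x)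
        (by rw [hSeq, List.append_assoc]; rfl)
        (by rw [List.getLast?_concat])
        (by simp)
        (by intro q hq; injection hq with hq; rw [← hq]; exact hf')
      rw [hlen] at hstep
      rw [hstep, List.countP_cons]
      by_cases hx : ((S.countP (fun y => decide (y < x)) : Int) = x)
      · have hx' : x = f' := by rw [hf', hx]
        have hd : (decide ((S.countP (fun y => decide (y < x)) : Int) = x)) = true := by
          simp [hx]
        rw [if_pos hx', hd]
        simp; omega
      · have hx' : ¬ (x = f') := fun h => hx (by rw [hf'] at h; omega)
        have hd : (decide ((S.countP (fun y => decide (y < x)) : Int) = x)) = false := by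
          simp [hx]
        rw [if_neg hx', hd]
        simp
    cases hpv : prev with
    | none =>
      have hP : P = [] := List.getLast?_eq_none_iff.mp (hpv ▸ hprev).symm
      have hc0 : (S.countP (fun y => decide (y < x)) : Int) = first := by
        rw [h0 hpv]
        have : S.countP (fun y => decide (y < x)) = 0 := by
          apply List.countP_eq_zero.mpr
          intro y hy
          rw [hSeq, hP, List.nil_append] at hy
          rcases List.mem_cons.mp hy with rfl | hy'
          · simp
          · simp [not_lt.mpr (hrest y hy')]
        simp [this]
      rw [pvNobleGo]
      exact tail first hc0.symm
    | some p =>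
      have hlast : P.getLast? = some p := (hpv ▸ hprev).symm
      have hpP : p ∈ P := List.mem_of_getLast? hlast
      have hmax : ∀ y ∈ P, y ≤ p := last_max P p hPpw hlast
      have hpx : p ≤ x := hcross p hpP x (by simp)
      have hfc : (if x ≠ p then (P.length : Int) else first)
          = (S.countP (fun y => decide (y < x)) : Int) := by
        by_cases hxp : x = p
        · rw [if_neg (by simp [hxp]), hsome p hpv, hxp]
        · have hplt : p < x := lt_of_le_of_ne hpx (fun h => hxp h.symm)
          have hcP : P.countP (fun y => decide (y < x)) = P.length :=
            List.countP_eq_length.mpr (fun y hy => by simp [lt_of_le_of_lt (hmax y hy) hplt])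
          have hcR : (x :: rest).countP (fun y => decide (y < x)) = 0 :=
            List.countP_eq_zero.mpr (fun y hy => by
              rcases List.mem_cons.mp hy with rfl | hy'
              · simp
              · simp [not_lt.mpr (hrest y hy')])
          rw [if_pos hxp, hSeq, List.countP_append, hcP, hcR]
          simp
      rw [pvNobleGo]
      exact tail _ hfc

lemma alt_eq_canonical (A : List Int) : nobleInteger_alt A = pvNoble A := by
  unfold nobleInteger_alt
  have hS : (PySem.List.sorted A (fun x => x) false).Pairwise (· ≤ ·) :=
    PySem.List.sorted_pairwise A (fun x => x)
  have hperm : (PySem.List.sorted A (fun x => x) false).Perm A :=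
    PySem.List.sorted_perm A (fun x => x) false
  have h := go_spec _ hS (PySem.List.sorted A (fun x => x) false) [] 0 0 none rfl rfl
    (fun _ => rfl) (by simp)
  simp only [List.length_nil, Nat.cast_zero] at h
  rw [h, zero_add]
  have hcong : (PySem.List.sorted A (fun x => x) false).countP
        (fun x => decide (((PySem.List.sorted A (fun x => x) false).countP
            (fun y => decide (y < x)) : Int) = x))
      = (PySem.List.sorted A (fun x => x) false).countP
        (fun x => decide ((A.countP (fun y => decide (y < x)) : Int) = x)) := by
    apply List.countP_congr
    intro a _
    rw [hperm.countP_eq]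
  rw [hcong, hperm.countP_eq, pvNoble]

-- ===== VERDICT (by name: the statement is the Claim_ definition above) =====
theorem nobleInteger_spec : Claim_equal_nobleInteger := by
  intro A _
  show nobleInteger A = nobleInteger_alt A
  rw [nobleInteger_eq_canonical, alt_eq_canonical]
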